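-- pv_equiv track=rewrite | github.com/pypi-data/pypi-mirror-359 | packages/koyaneframework/koyaneframework-0.0.2.tar.gz/koyaneframework-0.0.2/src/koyaneframework/core/analyzer/analyzer.py | duplicates_to_string
-- ===== SOURCE A (Python) =====
-- def duplicates_to_string(dup):
--     if not dup:
--         return "no duplicates found"
--
--     indent = "dublicates found..... "
--     words = [word.strip() for word in sorted(dup)]
--
--     lines = []
--     for i in range(0, len(words), 10):
--         line = ",".join(words[i:i + 10])
--         lines.append(line)
--
--     # Indentation: first line with prefix, all subsequent lines indented accordingly.
--     return ("\n" + " " * len(indent)).join([lines[0]] + lines[1:])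
-- ===== SOURCE B (Python) =====
-- def duplicates_to_string(dup):
--     if not dup:
--         return "no duplicates found"
--
--     pad = "\n" + " " * len("dublicates found..... ")
--     out = ""
--     left = 0  # slots remaining on the current line
--     for w in sorted(dup):
--         if left == 0:
--             if out:
--                 out += pad
--             left = 10
--         else:
--             out += ","
--         out += w.strip()
--         left -= 1
--     return out
-- ===== Notes on version B (the rewrite author's own statement) =====
-- stated objective: simpler
-- what changed: Replaced the range/slice chunking into a lines list plus a final join by a single pass over the sorted words with a slots-left-on-line countdown counter that appends each word with its separator directly; no intermediate lines list.
import Mathlib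
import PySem

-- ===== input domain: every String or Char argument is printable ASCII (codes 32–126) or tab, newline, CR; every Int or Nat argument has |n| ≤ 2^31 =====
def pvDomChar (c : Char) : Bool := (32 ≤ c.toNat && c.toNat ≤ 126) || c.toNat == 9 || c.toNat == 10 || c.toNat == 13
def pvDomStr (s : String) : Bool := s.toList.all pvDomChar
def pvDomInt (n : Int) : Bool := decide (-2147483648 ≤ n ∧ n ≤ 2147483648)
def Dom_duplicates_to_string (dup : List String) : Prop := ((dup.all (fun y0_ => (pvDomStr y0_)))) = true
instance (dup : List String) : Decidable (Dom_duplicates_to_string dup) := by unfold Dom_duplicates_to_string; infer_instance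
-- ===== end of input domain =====

-- B replaces the range/slice chunking into a `lines` list plus a final join by a single
-- pass over the sorted words with a slots-left-on-line countdown counter (objective: simpler).

-- ===== PORT A =====
def duplicates_to_string (dup : List String) : String :=
  if dup = [] then "no duplicates found"
  else
    let indent := "dublicates found..... "
    let words := (PySem.List.sorted dup (fun w => w) false).map (fun w => PySem.Str.strip w)
    let lines := (PySem.List.pyRange 0 (PySem.List.len words) 10).foldl
      (fun ls i => ls ++ [PySem.Str.join "," (PySem.List.slice words (some i) (some (i + 10)))])
      ([] : List String)
    -- '" " * len(indent)' ported by hand as replicate (exact: the length is nonnegative)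
    let sep := "\n" ++ String.ofList (List.replicate (PySem.Str.len indent).toNat ' ')
    -- 'lines[0]' raises IndexError on an empty lines list (unreachable here: dup ≠ [])
    match PySem.List.pyGet? lines 0 with
    | none => ""
    | some h => PySem.Str.join sep ([h] ++ PySem.List.slice lines (some 1) none)

-- ===== PORT B =====
def dtsGo (pad : String) : List String → String → Nat → String
  | [], out, _ => out
  | w :: ws, out, left =>
    if left = 0 then
      dtsGo pad ws ((if out = "" then out else out ++ pad) ++ PySem.Str.strip w) 9
    else
      dtsGo pad ws ((out ++ ",") ++ PySem.Str.strip w) (left - 1)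

def duplicates_to_string_alt (dup : List String) : String :=
  if dup = [] then "no duplicates found"
  else
    let pad := "\n" ++ String.ofList (List.replicate (PySem.Str.len "dublicates found..... ").toNat ' ')
    dtsGo pad (PySem.List.sorted dup (fun w => w) false) "" 0

-- ===== PRECONDITION & SPEC =====
def Spec_duplicates_to_string (dup : List String) (out : String) : Prop := out = duplicates_to_string_alt dup
instance (dup : List String) (out : String) : Decidable (Spec_duplicates_to_string dup out) := by unfold Spec_duplicates_to_string; infer_instance

-- ===== CLAIM (what is proved, stated in full; the proofs are below) =====
def Claim_equal_duplicates_to_string : Prop := ∀ (dup : List String), Dom_duplicates_to_string dup → Spec_duplicates_to_string dup (duplicates_to_string dup)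

-- ===== LEMMAS AND PROOFS =====

-- the chunks of 10 stripped words, comma-joined: the common shape both ports reduce to
def pvChunks : List String → List String
  | [] => []
  | w :: ws => PySem.Str.join "," (w :: ws.take 9) :: pvChunks (ws.drop 9)
  termination_by l => l.length
  decreasing_by simp [List.length_drop]

-- concatenation of the elements, each prefixed by sep
def pvSepCat (sep : String) : List String → String
  | [] => ""
  | x :: xs => sep ++ (x ++ pvSepCat sep xs)

-- strong induction in chunks of 10: the recursion pattern shared by pvChunks and pvGo
theorem chunksRec {motive : List String → Prop} (h1 : motive [])
    (h2 : ∀ w tl, motive (tl.drop 9) → motive (w :: tl)) : ∀ ws, motive ws := by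
  intro ws
  induction hn : ws.length using Nat.strong_induction_on generalizing ws with
  | _ n ih =>
    cases ws with
    | nil => exact h1
    | cons w tl =>
      exact h2 w tl (ih (tl.drop 9).length (by simp [List.length_drop] at hn ⊢; omega) _ rfl)

-- dtsGo with the stripping already done
def pvGo (pad : String) : List String → String → Nat → String
  | [], out, _ => out
  | w :: ws, out, left =>
    if left = 0 then pvGo pad ws ((if out = "" then out else out ++ pad) ++ w) 9
    else pvGo pad ws ((out ++ ",") ++ w) (left - 1)

theorem str_toList_ne_nil (s : String) (h : s ≠ "") : s.toList ≠ [] := by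
  intro hl
  exact h (String.toList_inj.mp (by simp [hl]))

theorem str_append_ne_empty_left (a b : String) (h : a ≠ "") : a ++ b ≠ "" := by
  intro hab
  have : (a ++ b).toList = [] := by simp [hab]
  rw [String.toList_append] at this
  exact str_toList_ne_nil a h (List.append_eq_nil_iff.mp this).1

theorem str_append_ne_empty_right (a b : String) (h : b ≠ "") : a ++ b ≠ "" := by
  intro hab
  have : (a ++ b).toList = [] := by simp [hab]
  rw [String.toList_append] at this
  exact str_toList_ne_nil b h (List.append_eq_nil_iff.mp this).2

theorem join_cons_eq (sep x : String) (xs : List String) :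
    PySem.Str.join sep (x :: xs) = x ++ pvSepCat sep xs := by
  induction xs generalizing x with
  | nil =>
    apply String.toList_inj.mp
    simp [PySem.Str.toList_join, PySem.Chars.join_singleton, pvSepCat]
  | cons y l ih =>
    have hcc : PySem.Str.join sep (x :: y :: l) = x ++ sep ++ PySem.Str.join sep (y :: l) := by
      apply String.toList_inj.mp
      simp [PySem.Str.toList_join, PySem.Chars.join_cons_cons]
    rw [hcc, ih, pvSepCat, String.append_assoc]

theorem foldl_append_map (l : List Int) (f : Int → String) (acc : List String) :
    l.foldl (fun ls i => ls ++ [f i]) acc = acc ++ l.map f := by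
  induction l generalizing acc with
  | nil => simp
  | cons x xs ih => simp [List.foldl_cons, ih]

theorem map_range_chunks (ws : List String) :
    (List.range ((ws.length + 9) / 10)).map
      (fun k => PySem.Str.join "," ((ws.drop (10 * k)).take 10)) = pvChunks ws := by
  induction ws using chunksRec with
  | h1 => simp [pvChunks]
  | h2 w tl ih =>
    have hc : (((w :: tl).length + 9) / 10) = ((List.drop 9 tl).length + 9) / 10 + 1 := by
      simp only [List.length_cons, List.length_drop]; omega
    rw [hc, List.range_succ_eq_map, List.map_cons, List.map_map]
    simp only [pvChunks]
    refine congrArg₂ List.cons ?_ ?_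
    · norm_num [List.take_succ_cons]
    · rw [← ih]
      apply List.map_congr_left
      intro k _
      simp only [Function.comp_apply]
      congr 2
      rw [List.drop_drop, show 10 * (k + 1) = (9 + 10 * k) + 1 from by ring,
        List.drop_succ_cons]

theorem lines_eq_chunks (ws : List String) :
    (PySem.List.pyRange 0 (PySem.List.len ws) 10).foldl
      (fun ls i => ls ++ [PySem.Str.join "," (PySem.List.slice ws (some i) (some (i + 10)))])
      ([] : List String) = pvChunks ws := by
  rw [PySem.List.pyRange_of_pos 0 (PySem.List.len ws) (by norm_num)]
  have hlen : PySem.List.len ws = (ws.length : Int) := by simp [PySem.List.len_eq]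
  have hcount : (if (0 : Int) < PySem.List.len ws then ((PySem.List.len ws - 0 + 10 - 1) / 10).toNat else 0)
      = (ws.length + 9) / 10 := by
    rw [hlen]
    split_ifs with h
    · omega
    · omega
  rw [hcount, foldl_append_map, List.nil_append, List.map_map, ← map_range_chunks]
  apply List.map_congr_left
  intro k _
  simp only [Function.comp]
  have h1 : (0 + 10 * (k : Int)) = ((10 * k : Nat) : Int) := by push_cast; ring
  rw [h1]
  have h3 : ((10 * k : Nat) : Int) + 10 = ((10 * k + 10 : Nat) : Int) := by push_cast; ring
  rw [h3, PySem.List.slice_natCast]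
  congr 2
  omega

theorem dtsGo_eq_pvGo (pad : String) (ws : List String) (out : String) (left : Nat) :
    dtsGo pad ws out left = pvGo pad (ws.map PySem.Str.strip) out left := by
  induction ws generalizing out left with
  | nil => simp [dtsGo, pvGo]
  | cons w tl ih => by_cases h : left = 0 <;> simp [dtsGo, pvGo, h, ih]

theorem pvGo_count (pad : String) (k : Nat) (ws : List String) (out : String) :
    pvGo pad ws out k = pvGo pad (ws.drop k) (out ++ pvSepCat "," (ws.take k)) 0 := by
  induction k generalizing ws out with
  | zero => simp [pvSepCat]
  | succ k ih =>
    cases ws with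
    | nil => simp [pvGo, pvSepCat]
    | cons w tl =>
      rw [pvGo, if_neg (by omega)]
      simp only [Nat.add_sub_cancel]
      rw [ih]
      simp [pvSepCat, String.append_assoc]

theorem pvGo_main (pad : String) (ws : List String) (out : String) (hout : out ≠ "") :
    pvGo pad ws out 0 = out ++ pvSepCat pad (pvChunks ws) := by
  induction ws using chunksRec generalizing out with
  | h1 => simp [pvGo, pvChunks, pvSepCat]
  | h2 w tl ih =>
    rw [pvGo, if_pos rfl, if_neg hout, pvGo_count pad 9 tl, String.append_assoc,
      show w ++ pvSepCat "," (tl.take 9) = PySem.Str.join "," (w :: tl.take 9) from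
        (join_cons_eq _ _ _).symm]
    rw [ih _ (str_append_ne_empty_left _ _ (str_append_ne_empty_left _ _ hout))]
    simp only [pvChunks, pvSepCat]
    simp [String.append_assoc]

theorem take9_sepcat_ne_empty (tl : List String) (h : tl ≠ []) :
    pvSepCat "," (tl.take 9) ≠ "" := by
  cases tl with
  | nil => exact absurd rfl h
  | cons x xs =>
    rw [List.take_succ_cons, pvSepCat]
    exact str_append_ne_empty_left _ _ (by decide)

-- ===== VERDICT (by name: the statement is the Claim_ definition above) =====
theorem duplicates_to_string_spec : Claim_equal_duplicates_to_string := by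
  unfold Claim_equal_duplicates_to_string Spec_duplicates_to_string
  intro dup _
  by_cases hd : dup = []
  · simp [duplicates_to_string, duplicates_to_string_alt, hd]
  · rw [duplicates_to_string, duplicates_to_string_alt, if_neg hd, if_neg hd]
    simp only
    set sep : String := "\n" ++ String.ofList (List.replicate (PySem.Str.len "dublicates found..... ").toNat ' ') with hsep
    set srt := PySem.List.sorted dup (fun w => w) false with hsrt
    have hsne : srt ≠ [] := by
      rw [hsrt]
      intro h
      exact hd ((PySem.List.sorted_eq_nil_iff dup (fun w => w) false).mp h)
    set ws := srt.map (fun w => PySem.Str.strip w) with hws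
    rw [lines_eq_chunks]
    rw [dtsGo_eq_pvGo]
    have hwseq : srt.map PySem.Str.strip = ws := by rw [hws]
    rw [hwseq]
    cases hwc : ws with
    | nil =>
      exact absurd (by simpa using congrArg List.length hwc) (by simp [hws, hsne])
    | cons w tl =>
      -- A side: lines = chunk1 :: pvChunks (tl.drop 9)
      simp only [pvChunks]
      rw [PySem.List.pyGet?_zero]
      simp only [List.getElem?_cons_zero]
      rw [PySem.List.slice_from_one]
      simp only [List.tail_cons, List.singleton_append]
      rw [join_cons_eq]
      -- B side
      rw [pvGo, if_pos rfl, if_pos rfl, String.empty_append, pvGo_count sep 9 tl]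
      cases htl : tl.drop 9 with
      | nil =>
        simp only [pvChunks, pvSepCat, pvGo]
        rw [join_cons_eq, String.append_empty]
      | cons z zs =>
        have htlne : tl ≠ [] := by
          intro h; rw [h] at htl; simp at htl
        rw [show w ++ pvSepCat "," (tl.take 9) = PySem.Str.join "," (w :: tl.take 9) from
          (join_cons_eq _ _ _).symm]
        rw [pvGo_main sep (z :: zs) _ (by
          rw [join_cons_eq]
          exact str_append_ne_empty_right _ _ (take9_sepcat_ne_empty tl htlne))]
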